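-- pv_equiv track=rewrite | github.com/ArtemGennadievich/PythonProject | pythonProject1/HW10.py | set_gen
-- ===== SOURCE A (Python) =====
-- def set_gen(listy):
--     list_11 = []
--     list_22 = []
--     list_res = []
--     umnoj = '1'
--     for i in listy:
--         for j in listy:
--             if i not in list_11:
--                 list_11.append(i)
--     for l in list_11:
--         list_22 = []
--         for k in listy:
--             if l == k:
--                 list_22.append(k)
--                 umnoj = str(k) * len(list_22)
--                 list_res.append(umnoj)
--     return list_res
-- ===== SOURCE B (Python) =====
-- def set_gen(listy):
--     counts = {}
--     for x in listy:
--         counts[x] = counts.get(x, 0) + 1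
--     return [str(k) * j for k, c in counts.items() for j in range(1, c + 1)]
-- ===== Notes on version B (the rewrite author's own statement) =====
-- stated objective: faster
-- what changed: B replaces A's quadratic dedup (nested rescans of listy) and per-distinct-element rescans of the whole list with one counting pass over listy building a dict, then emits the cumulative repetitions directly from each count.
import Mathlib
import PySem

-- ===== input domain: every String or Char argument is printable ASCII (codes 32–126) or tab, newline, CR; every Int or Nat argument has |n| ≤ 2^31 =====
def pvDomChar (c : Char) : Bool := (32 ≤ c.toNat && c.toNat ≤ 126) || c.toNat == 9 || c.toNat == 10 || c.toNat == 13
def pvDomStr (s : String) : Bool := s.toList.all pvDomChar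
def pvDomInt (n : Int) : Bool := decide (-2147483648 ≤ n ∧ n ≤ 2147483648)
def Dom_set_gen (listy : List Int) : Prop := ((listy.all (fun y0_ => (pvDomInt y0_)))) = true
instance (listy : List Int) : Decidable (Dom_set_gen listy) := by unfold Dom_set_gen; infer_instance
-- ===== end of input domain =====

-- B replaces A's nested quadratic rescans with a single counting pass plus direct emission (objective: faster).

-- str(s) * n for a Python string and a repetition count (shared Python primitive used by both sources)
def pyStrMul (s : String) (n : Int) : String := String.join (List.replicate n.toNat s)

-- ===== PORT A =====
def set_gen (listy : List Int) : List String :=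
  -- state of the second loop nest: (list_22, umnoj, list_res)
  let list11 := listy.foldl (fun acc i =>
      listy.foldl (fun acc2 _j => if acc2.contains i then acc2 else acc2 ++ [i]) acc) []
  let st := list11.foldl (fun (st : List Int × String × List String) l =>
      listy.foldl (fun (st : List Int × String × List String) k =>
        if l == k then
          let list22 := st.1 ++ [k]
          let umnoj := pyStrMul (PySem.Int.toStr k) (list22.length : Int)
          (list22, umnoj, st.2.2 ++ [umnoj])
        else st) ([], st.2.1, st.2.2)) ([], "1", [])
  st.2.2

-- ===== PORT B =====
def set_gen_alt (listy : List Int) : List String :=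
  let counts := listy.foldl (fun d x => d.insert x (d.getD x 0 + 1)) PySem.Dict.empty
  counts.items.flatMap (fun kc =>
    (PySem.List.pyRange 1 (kc.2 + 1) 1).map (fun j => pyStrMul (PySem.Int.toStr kc.1) j))

-- ===== PRECONDITION & SPEC =====
def Spec_set_gen (listy : List Int) (out : List String) : Prop := out = set_gen_alt listy
instance (listy : List Int) (out : List String) : Decidable (Spec_set_gen listy out) := by unfold Spec_set_gen; infer_instance

-- ===== CLAIM (what is proved, stated in full; the proofs are below) =====
def Claim_equal_set_gen : Prop := ∀ (listy : List Int), Dom_set_gen listy → Spec_set_gen listy (set_gen listy)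

-- ===== LEMMAS AND PROOFS =====

-- the canonical result both ports compute: per first-occurrence-distinct l, the cumulative repetitions
def pvEmit (listy : List Int) (D : List Int) : List String :=
  D.flatMap (fun l => (List.range (listy.count l)).map (fun (i : Nat) => pyStrMul (PySem.Int.toStr l) ((i : Int) + 1)))

theorem pv_beq_comm (a b : Int) : (a == b) = (b == a) := by
  by_cases h : a = b
  · simp [h]
  · simp [h, Ne.symm h]

theorem pv_inner_id (i : Int) : ∀ (L acc2 : List Int), acc2.contains i →
    L.foldl (fun acc2 _j => if acc2.contains i then acc2 else acc2 ++ [i]) acc2 = acc2 := by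
  intro L
  induction L with
  | nil => intro acc2 h; rfl
  | cons x xs ih => intro acc2 h; simp only [List.foldl_cons, h, if_pos]; exact ih acc2 h

theorem pv_inner_step (i : Int) (L : List Int) (hL : L ≠ []) (acc : List Int) :
    L.foldl (fun acc2 _j => if acc2.contains i then acc2 else acc2 ++ [i]) acc
      = PySem.Set.add acc i := by
  obtain ⟨x, xs, rfl⟩ := List.exists_cons_of_ne_nil hL
  simp only [List.foldl_cons, PySem.Set.add, PySem.Set.contains]
  by_cases h : acc.contains i
  · rw [if_pos h, if_pos h, pv_inner_id i xs acc h]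
  · rw [if_neg h, if_neg h, pv_inner_id i xs _ (by simp)]

theorem pv_list11_eq (listy : List Int) :
    (listy.foldl (fun acc i =>
      listy.foldl (fun acc2 _j => if acc2.contains i then acc2 else acc2 ++ [i]) acc) []) =
    PySem.Set.ofList listy := by
  rw [PySem.Set.ofList_eq_foldl]
  rcases h : listy with _ | ⟨y, ys⟩
  · rfl
  · rw [← h]
    have hne : listy ≠ [] := by rw [h]; simp
    have : ∀ (M : List Int) (acc : List Int),
        M.foldl (fun acc i =>
          listy.foldl (fun acc2 _j => if acc2.contains i then acc2 else acc2 ++ [i]) acc) acc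
        = M.foldl PySem.Set.add acc := by
      intro M
      induction M with
      | nil => intro acc; rfl
      | cons m ms ih =>
        intro acc
        simp only [List.foldl_cons, ih, pv_inner_step m listy hne acc]
    exact this listy []

-- the inner loop of A's second nest, at an arbitrary starting state
theorem pv_inner2 (l : Int) : ∀ (L : List Int) (l22 : List Int) (u : String) (res : List String),
    (L.foldl (fun (st : List Int × String × List String) k =>
        if l == k then
          let list22 := st.1 ++ [k]
          let umnoj := pyStrMul (PySem.Int.toStr k) (list22.length : Int)
          (list22, umnoj, st.2.2 ++ [umnoj])
        else st) (l22, u, res)).2.2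
      = res ++ (List.range (L.count l)).map
          (fun i => pyStrMul (PySem.Int.toStr l) (((l22.length + i : Nat) : Int) + 1)) := by
  intro L
  induction L with
  | nil => intro l22 u res; simp
  | cons k rest ih =>
    intro l22 u res
    by_cases h : l == k
    · have hk : k = l := (eq_of_beq h).symm
      subst hk
      simp only [List.foldl_cons, if_pos h, List.count_cons_self]
      rw [ih, List.range_succ_eq_map, List.map_cons, List.map_map, List.append_assoc,
        List.singleton_append]
      congr 1
      congr 1
      · congr 1
        simp only [List.length_append, List.length_cons, List.length_nil]
        push_cast; ring
      · apply List.map_congr_left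
        intro i _
        simp only [Function.comp_apply]
        congr 1
        simp only [List.length_append, List.length_cons, List.length_nil]
        push_cast; ring
    · simp only [List.foldl_cons, if_neg h]
      rw [ih]
      have : (k :: rest).count l = rest.count l := by
        rw [List.count_cons, pv_beq_comm k l]
        simp [h]
      rw [this]

-- the whole second loop nest of A
theorem pv_outer (listy : List Int) : ∀ (D : List Int) (st : List Int × String × List String),
    (D.foldl (fun (st : List Int × String × List String) l =>
      listy.foldl (fun (st : List Int × String × List String) k =>
        if l == k then
          let list22 := st.1 ++ [k]
          let umnoj := pyStrMul (PySem.Int.toStr k) (list22.length : Int)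
          (list22, umnoj, st.2.2 ++ [umnoj])
        else st) ([], st.2.1, st.2.2)) st).2.2
    = st.2.2 ++ pvEmit listy D := by
  intro D
  induction D with
  | nil => intro st; simp [pvEmit]
  | cons l D' ih =>
    intro st
    simp only [List.foldl_cons]
    rw [ih, pv_inner2 l listy [] st.2.1 st.2.2, List.append_assoc]
    congr 1
    simp only [pvEmit, List.flatMap_cons]
    congr 1
    simp only [List.length_nil, Nat.zero_add]

theorem pv_A_eq (listy : List Int) : set_gen listy = pvEmit listy (PySem.Set.ofList listy) := by
  unfold set_gen
  rw [pv_list11_eq]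
  rw [pv_outer listy (PySem.Set.ofList listy) ([], "1", [])]
  simp

theorem pv_B_eq (listy : List Int) : set_gen_alt listy = pvEmit listy (PySem.Set.ofList listy) := by
  unfold set_gen_alt
  rw [PySem.Dict.foldl_insert_getD_add_one_eq_counter]
  simp only [PySem.Dict.items_counter, List.flatMap_map]
  unfold pvEmit
  congr 1
  funext k
  rw [PySem.List.pyRange_one]
  have hc : ((List.count k listy : Int) + 1 - 1).toNat = List.count k listy := by
    simp
  rw [hc, List.map_map]
  apply List.map_congr_left
  intro i _
  simp only [Function.comp_apply]
  congr 1
  ring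

-- ===== VERDICT (by name: the statement is the Claim_ definition above) =====
theorem set_gen_spec : Claim_equal_set_gen := by
  intro listy _
  unfold Spec_set_gen
  rw [pv_A_eq, pv_B_eq]
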